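-- pv_equiv track=rewrite | github.com/hunghn/kbs | backend/app/api/quiz.py | _count_consecutive_fail_on_topic
-- ===== SOURCE A (Python) =====
-- def _count_consecutive_fail_on_topic(scoring_data: list[dict], topic_id: int) -> int:
--     """Count how many of the most recent answers on *topic_id* were wrong in a row.
--
--     Iterates from newest to oldest; stops as soon as a correct answer (on that topic) is found.
--     """
--     count = 0
--     for item in reversed(scoring_data):
--         if item.get("topic_id") != topic_id:
--             continue
--         if not item.get("is_correct"):
--             count += 1
--         else:
--             break
--     return count
-- ===== SOURCE B (Python) =====
-- def _count_consecutive_fail_on_topic(scoring_data: list[dict], topic_id: int) -> int: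
--     """Staged passes: project each topic answer to a correctness flag, reverse,
--     and the trailing wrong-run is the position of the first correct answer."""
--     flags = [bool(it.get("is_correct")) for it in scoring_data if it.get("topic_id") == topic_id]
--     rev = flags[::-1]
--     return rev.index(True) if True in rev else len(rev)
-- ===== Notes on version B (the rewrite author's own statement) =====
-- stated objective: simpler
-- what changed: Replaced the interleaved skip/count/break loop by staged passes: filter-and-map the topic answers to boolean correctness flags, reverse, and return the index of the first True (or the length if none).
import Mathlib
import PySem

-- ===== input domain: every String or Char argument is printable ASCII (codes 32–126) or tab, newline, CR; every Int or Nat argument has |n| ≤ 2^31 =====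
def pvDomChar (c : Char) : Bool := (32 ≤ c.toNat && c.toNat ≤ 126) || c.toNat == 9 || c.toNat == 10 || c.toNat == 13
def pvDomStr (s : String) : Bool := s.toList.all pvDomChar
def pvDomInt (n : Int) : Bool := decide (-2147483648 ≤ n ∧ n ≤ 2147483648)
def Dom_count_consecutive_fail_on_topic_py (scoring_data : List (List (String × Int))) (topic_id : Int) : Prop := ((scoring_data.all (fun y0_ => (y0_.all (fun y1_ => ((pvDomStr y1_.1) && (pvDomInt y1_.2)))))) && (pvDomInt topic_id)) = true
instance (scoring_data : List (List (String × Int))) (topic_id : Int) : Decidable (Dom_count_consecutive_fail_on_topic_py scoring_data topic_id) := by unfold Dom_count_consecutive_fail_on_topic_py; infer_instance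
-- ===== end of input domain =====

-- B replaces A's newest-to-oldest skip/count/break loop by staged passes
-- (filter-and-map to correctness flags, reverse, index of first True). Objective: simpler.

-- ===== PORT A =====
-- dict.get on a List-encoded dict: first match, none = missing key (exact)
def pvDictGet : List (String × Int) → String → Option Int
  | [], _ => none
  | (k, v) :: rest, key => if k = key then some v else pvDictGet rest key

-- Python truthiness of item.get(...): None and 0 are falsy
def pvTruthy : Option Int → Bool
  | none => false
  | some v => v != 0

-- the for-loop over reversed(scoring_data) with continue/break, state = count
def pvLoopA (topic_id : Int) : List (List (String × Int)) → Int → Int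
  | [], count => count
  | item :: rest, count =>
    if pvDictGet item "topic_id" ≠ some topic_id then pvLoopA topic_id rest count
    else if ¬ pvTruthy (pvDictGet item "is_correct") then pvLoopA topic_id rest (count + 1)
    else count

def count_consecutive_fail_on_topic_py (scoring_data : List (List (String × Int))) (topic_id : Int) : Int :=
  pvLoopA topic_id scoring_data.reverse 0

-- ===== PORT B =====
-- flags = [bool(it.get("is_correct")) for it in scoring_data if it.get("topic_id") == topic_id]
-- rev = flags[::-1];  return rev.index(True) if True in rev else len(rev)
def count_consecutive_fail_on_topic_py_alt (scoring_data : List (List (String × Int))) (topic_id : Int) : Int :=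
  let flags := (scoring_data.filter (fun it => List.lookup "topic_id" it == some topic_id)).map
    (fun it => (List.lookup "is_correct" it).getD 0 != 0)
  let rev := flags.reverse
  if rev.contains true then ((PySem.List.index? rev true).getD 0 : Nat) else (rev.length : Nat)

-- ===== PRECONDITION & SPEC =====
def Spec_count_consecutive_fail_on_topic_py (scoring_data : List (List (String × Int))) (topic_id : Int) (out : Int) : Prop := out = count_consecutive_fail_on_topic_py_alt scoring_data topic_id
instance (scoring_data : List (List (String × Int))) (topic_id : Int) (out : Int) : Decidable (Spec_count_consecutive_fail_on_topic_py scoring_data topic_id out) := by unfold Spec_count_consecutive_fail_on_topic_py; infer_instance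

-- ===== CLAIM (what is proved, stated in full; the proofs are below) =====
def Claim_equal_count_consecutive_fail_on_topic_py : Prop := ∀ (scoring_data : List (List (String × Int))) (topic_id : Int), Dom_count_consecutive_fail_on_topic_py scoring_data topic_id → Spec_count_consecutive_fail_on_topic_py scoring_data topic_id (count_consecutive_fail_on_topic_py scoring_data topic_id)

-- ===== LEMMAS AND PROOFS =====

-- the value B computes from a flag list (used only in the proofs)
def pvIdx (l : List Bool) : Int :=
  if l.contains true then ((PySem.List.index? l true).getD 0 : Nat) else (l.length : Nat)

theorem pvDictGet_eq_lookup (item : List (String × Int)) (k : String) :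
    pvDictGet item k = List.lookup k item := by
  induction item with
  | nil => rfl
  | cons p rest ih =>
    obtain ⟨a, b⟩ := p
    by_cases h : a = k
    · simp [pvDictGet, List.lookup, h]
    · have hk : (k == a) = false := beq_eq_false_iff_ne.mpr (Ne.symm h)
      simp [pvDictGet, List.lookup, h, hk, ih]

theorem pvTruthy_eq (o : Option Int) : pvTruthy o = (o.getD 0 != 0) := by
  cases o <;> simp [pvTruthy]

theorem pvIdx_false (t : List Bool) : pvIdx (false :: t) = 1 + pvIdx t := by
  unfold pvIdx
  rw [PySem.List.index?_cons_of_ne t (by simp)]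
  by_cases h : t.contains true
  · have hs : (PySem.List.index? t true).isSome :=
      (PySem.List.index?_isSome_iff t true).mpr (by simpa using h)
    rcases Option.isSome_iff_exists.mp hs with ⟨k, hk⟩
    have hmem : true ∈ t := by simpa using h
    rw [hk]
    simp [hmem]
    omega
  · have hn : PySem.List.index? t true = none :=
      (PySem.List.index?_eq_none_iff t true).mpr (by simpa using h)
    have hmem : ¬ true ∈ t := by simpa using h
    rw [hn]
    simp [hmem]
    omega

theorem pvIdx_true (t : List Bool) : pvIdx (true :: t) = 0 := by
  simp [pvIdx]

-- A's loop only adds to its accumulator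
theorem pvLoopA_acc (topic_id : Int) (r : List (List (String × Int))) (c : Int) :
    pvLoopA topic_id r c = c + pvLoopA topic_id r 0 := by
  induction r generalizing c with
  | nil => simp [pvLoopA]
  | cons item rest ih =>
    simp only [pvLoopA]
    split_ifs with h1 h2
    · exact ih c
    · omega
    · rw [ih (c + 1), ih (0 + 1)]; ring

-- A's loop computes the first-True index of the flag list of its input
theorem pvLoopA_eq_pvIdx (topic_id : Int) (r : List (List (String × Int))) :
    pvLoopA topic_id r 0 =
      pvIdx ((r.filter (fun it => List.lookup "topic_id" it == some topic_id)).map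
        (fun it => (List.lookup "is_correct" it).getD 0 != 0)) := by
  induction r with
  | nil => simp [pvLoopA, pvIdx]
  | cons item rest ih =>
    simp only [pvLoopA, List.filter_cons]
    by_cases h1 : pvDictGet item "topic_id" = some topic_id
    · have hm : (List.lookup "topic_id" item == some topic_id) = true := by
        rw [← pvDictGet_eq_lookup]; simp [h1]
      by_cases h2 : pvTruthy (pvDictGet item "is_correct") = true
      · have hf : ((List.lookup "is_correct" item).getD 0 != 0) = true := by
          rw [← pvDictGet_eq_lookup, ← pvTruthy_eq]; exact h2
        simp [h1, h2, hm, hf, pvIdx_true]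
      · have hf : ((List.lookup "is_correct" item).getD 0 != 0) = false := by
          rw [← pvDictGet_eq_lookup, ← pvTruthy_eq]; simpa using h2
        rw [pvLoopA_acc topic_id rest (0 + 1), ih]
        simp [h1, h2, hm, hf, pvIdx_false]
    · have hm : (List.lookup "topic_id" item == some topic_id) = false := by
        rw [← pvDictGet_eq_lookup]; simpa using h1
      simp [h1, hm, ih]

-- ===== VERDICT (by name: the statement is the Claim_ definition above) =====
theorem count_consecutive_fail_on_topic_py_spec : Claim_equal_count_consecutive_fail_on_topic_py := by
  intro scoring_data topic_id _
  show _ = _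
  unfold count_consecutive_fail_on_topic_py count_consecutive_fail_on_topic_py_alt
  rw [pvLoopA_eq_pvIdx]
  simp only [List.filter_reverse, List.map_reverse]
  rfl
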